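-- pv_equiv track=rewrite | github.com/Timoniche/BioInf | utils/PermutUtils.py | permut_cycles
-- ===== SOURCE A (Python) =====
-- def in_its_place(elem_indexed, i):
--     return elem_indexed == i
--
-- def permut_cycles(permut):
--     sz = len(permut)
--     indexed_permut = [*enumerate(permut)]
--     indexed_permut = sorted(indexed_permut, key=lambda e: e[1])
--     visited = {b: False for b in range(sz)}
--     cnt_cycles = 0
--     for i in range(sz):
--         if in_its_place(indexed_permut[i][0], i):
--             cnt_cycles += 1
--             continue
--         if visited[i]:
--             continue
--         traverse = i
--         cnt_cycles += 1
--         while not visited[traverse]: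
--             visited[traverse] = True
--             traverse = indexed_permut[traverse][0]
--     return cnt_cycles
-- ===== SOURCE B (Python) =====
-- def permut_cycles(permut):
--     n = len(permut)
--     order = sorted(range(n), key=lambda i: permut[i])
--     cnt_cycles = 0
--     for i in range(n):
--         j = order[i]
--         while j > i:
--             j = order[j]
--         if j == i:
--             cnt_cycles += 1
--     return cnt_cycles
-- ===== Notes on version B (the rewrite author's own statement) =====
-- stated objective: alternative
-- what changed: B replaces A's sort-of-(index,value)-pairs + visited dict + cycle-marking traversal by an argsort followed by the classic cycle-minima count: from each i walk j = order[j] while j > i and count i when the walk returns to i, using no visited structure at all.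
import Mathlib
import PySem

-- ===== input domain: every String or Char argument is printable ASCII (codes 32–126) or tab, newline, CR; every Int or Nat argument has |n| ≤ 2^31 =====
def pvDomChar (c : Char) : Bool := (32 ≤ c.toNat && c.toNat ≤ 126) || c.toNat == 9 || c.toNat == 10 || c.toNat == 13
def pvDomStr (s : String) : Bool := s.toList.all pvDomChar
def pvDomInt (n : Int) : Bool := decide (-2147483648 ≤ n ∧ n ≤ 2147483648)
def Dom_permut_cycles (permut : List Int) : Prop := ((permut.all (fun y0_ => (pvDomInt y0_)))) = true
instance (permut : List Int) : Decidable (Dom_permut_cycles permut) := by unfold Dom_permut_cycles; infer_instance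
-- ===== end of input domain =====

-- B counts each cycle once at its minimal element by a pointer walk with no visited structure,
-- instead of A's sort-of-pairs + visited dict + cycle-marking traversal (objective: alternative).

-- ===== PORT A =====
def in_its_place (elem_indexed : Int) (i : Int) : Bool := elem_indexed == i

-- 'while not visited[traverse]: visited[traverse] = True; traverse = indexed_permut[traverse][0]'
-- fuel-bounded (fuel sz+1 always suffices: each iteration marks one previously unmarked index)
def pcWhile (idx : List (Int × Int)) : Nat → PySem.Dict Int Bool → Int → PySem.Dict Int Bool × Int
  | 0, visited, traverse => (visited, traverse)
  | fuel + 1, visited, traverse =>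
    if visited.getD traverse false then (visited, traverse)
    else pcWhile idx fuel (visited.insert traverse true) (PySem.List.pyGetD idx traverse (0, 0)).1

def permut_cycles (permut : List Int) : Int :=
  let sz : Int := PySem.List.len permut
  let indexed_permut := PySem.List.sorted (PySem.List.enumerate permut) (fun e => e.2) false
  let visited0 : PySem.Dict Int Bool :=
    (PySem.List.pyRange 0 sz 1).foldl (fun d b => d.insert b false) PySem.Dict.empty
  let st :=
    (PySem.List.pyRange 0 sz 1).foldl
      (fun (st : PySem.Dict Int Bool × Int) i =>
        if in_its_place (PySem.List.pyGetD indexed_permut i (0, 0)).1 i then (st.1, st.2 + 1)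
        else if st.1.getD i false then st
        else ((pcWhile indexed_permut (permut.length + 1) st.1 i).1, st.2 + 1))
      (visited0, 0)
  st.2

-- ===== PORT B =====
-- 'j = order[i]; while j > i: j = order[j]' — fuel-bounded (fuel sz always suffices: the walk
-- returns to a value ≤ i within the cycle length)
def pcWalk (order : List Int) : Nat → Int → Int → Int
  | 0, _, j => j
  | fuel + 1, i, j => if j > i then pcWalk order fuel i (PySem.List.pyGetD order j 0) else j

def permut_cycles_alt (permut : List Int) : Int :=
  let n : Int := PySem.List.len permut
  let order := PySem.List.sorted (PySem.List.pyRange 0 n 1) (fun i => PySem.List.pyGetD permut i 0) false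
  (PySem.List.pyRange 0 n 1).foldl
    (fun cnt i =>
      if pcWalk order permut.length i (PySem.List.pyGetD order i 0) == i then cnt + 1 else cnt)
    0

-- ===== PRECONDITION & SPEC =====
def Spec_permut_cycles (permut : List Int) (out : Int) : Prop := out = permut_cycles_alt permut
instance (permut : List Int) (out : Int) : Decidable (Spec_permut_cycles permut out) := by unfold Spec_permut_cycles; infer_instance

-- ===== CLAIM (what is proved, stated in full; the proofs are below) =====
def Claim_equal_permut_cycles : Prop := ∀ (permut : List Int), Dom_permut_cycles permut → Spec_permut_cycles permut (permut_cycles permut)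

-- ===== LEMMAS AND PROOFS =====

-- ---- basic objects (proof-only helpers) ----

def pvG (ord : List Int) (j : Int) : Int := PySem.List.pyGetD ord j 0
def pvIn (n : Nat) (i : Int) : Prop := 0 ≤ i ∧ i < (n : Int)
def pvGood (ord : List Int) (n : Nat) : Prop :=
  ord.length = n ∧ (∀ j ∈ ord, 0 ≤ j ∧ j < (n : Int)) ∧ ord.Nodup
def pvReach (ord : List Int) (i j : Int) : Prop := ∃ k, (pvG ord)^[k] i = j
def pvIsMin (ord : List Int) (i : Int) : Prop := ∀ k, i ≤ (pvG ord)^[k] i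
noncomputable def pvPer (ord : List Int) (i : Int) : Nat :=
  sInf {m : Nat | 0 < m ∧ (pvG ord)^[m] i = i}
def pvReachB (ord : List Int) (n : Nat) (i j : Int) : Bool :=
  (List.range (n + 1)).any (fun k => (pvG ord)^[k] i == j)
noncomputable def pvOm (ord : List Int) (n : Nat) (i : Int) : Nat :=
  sInf {t : Nat | pvReachB ord n i (t : Int) = true}
noncomputable def pvCnt (ord : List Int) (n : Nat) (i : Nat) : Nat :=
  (List.range i).countP (fun (t : Nat) => pvOm ord n ((t : Nat) : Int) == t)
noncomputable def pvM (ord : List Int) (i : Int) : Nat :=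
  sInf {m : Nat | 0 < m ∧ (pvG ord)^[m] i ≤ i}

-- ---- range/injectivity facts ----

lemma pvG_getElem (ord : List Int) (n : Nat) (i : Int) (hg : pvGood ord n) (hi : pvIn n i)
    (h : i.toNat < ord.length) : pvG ord i = ord[i.toNat] := by
  have hlen := hg.1
  obtain ⟨hi0, hi1⟩ := hi
  exact PySem.List.pyGetD_eq_getElem ord 0 hi0 (by omega)

lemma pvG_in (ord : List Int) (n : Nat) (i : Int) (hg : pvGood ord n) (hi : pvIn n i) :
    pvIn n (pvG ord i) := by
  have hmem : pvG ord i ∈ ord := by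
    apply PySem.List.pyGetD_mem
    have hlen := hg.1
    obtain ⟨hi0, hi1⟩ := hi
    simp only [PySem.Raise.InRange]
    constructor <;> omega
  exact hg.2.1 _ hmem

lemma pvG_inj (ord : List Int) (n : Nat) (i j : Int) (hg : pvGood ord n) (hi : pvIn n i)
    (hj : pvIn n j) (h : pvG ord i = pvG ord j) : i = j := by
  have hlen := hg.1
  obtain ⟨hi0, hi1⟩ := hi
  obtain ⟨hj0, hj1⟩ := hj
  have hli : i.toNat < ord.length := by omega
  have hlj : j.toNat < ord.length := by omega
  rw [pvG_getElem ord n i hg ⟨hi0, hi1⟩ hli, pvG_getElem ord n j hg ⟨hj0, hj1⟩ hlj] at h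
  have := (hg.2.2.getElem_inj_iff (hi := hli) (hj := hlj)).mp h
  omega

lemma pvIter_in (ord : List Int) (n : Nat) (i : Int) (hg : pvGood ord n) (hi : pvIn n i)
    (k : Nat) : pvIn n ((pvG ord)^[k] i) := by
  induction k with
  | zero => exact hi
  | succ k ih =>
    rw [Function.iterate_succ_apply']
    exact pvG_in ord n _ hg ih

lemma pvCancel (ord : List Int) (n : Nat) (a : Nat) (i j : Int) (hg : pvGood ord n)
    (hi : pvIn n i) (hj : pvIn n j) (h : (pvG ord)^[a] i = (pvG ord)^[a] j) : i = j := by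
  induction a generalizing i j with
  | zero => exact h
  | succ a ih =>
    rw [Function.iterate_succ_apply, Function.iterate_succ_apply] at h
    exact pvG_inj ord n i j hg hi hj
      (ih (pvG ord i) (pvG ord j) (pvG_in ord n i hg hi) (pvG_in ord n j hg hj) h)

lemma pvRet (ord : List Int) (n : Nat) (i : Int) (hg : pvGood ord n) (hi : pvIn n i) :
    ∃ m, 0 < m ∧ m ≤ n ∧ (pvG ord)^[m] i = i := by
  have maps : ∀ k ∈ Finset.range (n + 1), ((pvG ord)^[k] i).toNat ∈ Finset.range n := by
    intro k _
    obtain ⟨h0, h1⟩ := pvIter_in ord n i hg hi k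
    simp only [Finset.mem_range]
    omega
  obtain ⟨a, ha, b, hb, hab, heq⟩ :=
    Finset.exists_ne_map_eq_of_card_lt_of_maps_to (by simp) maps
  have hiq : ∀ x y : Nat, x < y → y ≤ n → ((pvG ord)^[x] i).toNat = ((pvG ord)^[y] i).toNat →
      ∃ m, 0 < m ∧ m ≤ n ∧ (pvG ord)^[m] i = i := by
    intro x y hxy hyn hxyeq
    obtain ⟨hx0, hx1⟩ := pvIter_in ord n i hg hi x
    obtain ⟨hy0, hy1⟩ := pvIter_in ord n i hg hi y
    have heqI : (pvG ord)^[x] i = (pvG ord)^[y] i := by omega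
    have hsplit : (pvG ord)^[y] i = (pvG ord)^[x] ((pvG ord)^[y - x] i) := by
      rw [← Function.iterate_add_apply]
      congr 1
      omega
    refine ⟨y - x, by omega, by omega, ?_⟩
    exact (pvCancel ord n x ((pvG ord)^[y - x] i) i hg
      (pvIter_in ord n i hg hi _) hi (by rw [← hsplit, ← heqI]))
  simp only [Finset.mem_range] at ha hb
  rcases Nat.lt_or_ge a b with hlt | hge
  · exact hiq a b hlt (by omega) heq
  · exact hiq b a (by omega) (by omega) heq.symm

lemma pvPerEx (ord : List Int) (n : Nat) (i : Int) (hg : pvGood ord n) (hi : pvIn n i) :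
    ∃ m, 0 < m ∧ (pvG ord)^[m] i = i := by
  obtain ⟨m, h1, _, h3⟩ := pvRet ord n i hg hi
  exact ⟨m, h1, h3⟩

lemma pvPer_mem (ord : List Int) (n : Nat) (i : Int) (hg : pvGood ord n) (hi : pvIn n i) :
    0 < pvPer ord i ∧ (pvG ord)^[pvPer ord i] i = i := by
  have hne : {m : Nat | 0 < m ∧ (pvG ord)^[m] i = i}.Nonempty := pvPerEx ord n i hg hi
  exact Nat.sInf_mem hne

lemma pvPer_iter (ord : List Int) (n : Nat) (i : Int) (hg : pvGood ord n) (hi : pvIn n i) :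
    (pvG ord)^[pvPer ord i] i = i := by
  exact (pvPer_mem ord n i hg hi).2

lemma pvPer_le (ord : List Int) (n : Nat) (i : Int) (hg : pvGood ord n) (hi : pvIn n i) :
    pvPer ord i ≤ n := by
  obtain ⟨m, h1, h2, h3⟩ := pvRet ord n i hg hi
  exact le_trans (Nat.sInf_le ⟨h1, h3⟩) h2

lemma pvPer_min (ord : List Int) (n : Nat) (i : Int) (hg : pvGood ord n) (hi : pvIn n i)
    (m : Nat) (hm0 : 0 < m) (hm : m < pvPer ord i) : (pvG ord)^[m] i ≠ i := by
  intro hcon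
  have hle : pvPer ord i ≤ m := Nat.sInf_le ⟨hm0, hcon⟩
  omega

lemma pvIterMulRet (ord : List Int) (i : Int) (m : Nat) (hret : (pvG ord)^[m] i = i)
    (q : Nat) : (pvG ord)^[m * q] i = i := by
  induction q with
  | zero => simp
  | succ q ih =>
    have : m * (q + 1) = m * q + m := by ring
    rw [this, Function.iterate_add_apply, hret, ih]

lemma pvIterMod (ord : List Int) (i : Int) (m : Nat) (hret : (pvG ord)^[m] i = i)
    (k : Nat) : (pvG ord)^[k] i = (pvG ord)^[k % m] i := by
  rcases Nat.eq_zero_or_pos m with hm | hm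
  · subst hm; simp
  · conv_lhs => rw [← Nat.mod_add_div k m]
    rw [Function.iterate_add_apply, pvIterMulRet ord i m hret]

lemma pvReach_symm (ord : List Int) (n : Nat) (i j : Int) (hg : pvGood ord n) (hi : pvIn n i)
    (h : pvReach ord i j) : pvReach ord j i := by
  obtain ⟨k, hk⟩ := h
  obtain ⟨hp, hpi⟩ := pvPer_mem ord n i hg hi
  have hm : (pvG ord)^[pvPer ord i * (k + 1)] i = i := pvIterMulRet ord i _ hpi (k + 1)
  have hk_le : k ≤ pvPer ord i * (k + 1) := by nlinarith
  refine ⟨pvPer ord i * (k + 1) - k, ?_⟩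
  rw [← hk, ← Function.iterate_add_apply]
  rw [show pvPer ord i * (k + 1) - k + k = pvPer ord i * (k + 1) by omega]
  exact hm

lemma pvReach_in (ord : List Int) (n : Nat) (i j : Int) (hg : pvGood ord n) (hi : pvIn n i)
    (h : pvReach ord i j) : pvIn n j := by
  obtain ⟨k, hk⟩ := h
  rw [← hk]
  exact pvIter_in ord n i hg hi k

lemma pvReachB_iff (ord : List Int) (n : Nat) (i j : Int) (hg : pvGood ord n) (hi : pvIn n i) :
    pvReachB ord n i j = true ↔ pvReach ord i j := by
  unfold pvReachB
  simp only [List.any_eq_true, List.mem_range, beq_iff_eq]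
  constructor
  · rintro ⟨k, _, hk⟩; exact ⟨k, hk⟩
  · rintro ⟨k, hk⟩
    refine ⟨k % pvPer ord i, ?_, ?_⟩
    · have h1 := pvPer_le ord n i hg hi
      have h2 := (pvPer_mem ord n i hg hi).1
      have := Nat.mod_lt k h2
      omega
    · rw [← pvIterMod ord i _ (pvPer_iter ord n i hg hi) k]
      exact hk

lemma pvOm_reach (ord : List Int) (n : Nat) (i : Int) (hg : pvGood ord n) (hi : pvIn n i) :
    pvReach ord i ((pvOm ord n i : Nat) : Int) := by
  obtain ⟨hi0, hi1⟩ := hi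
  have hcast : ((i.toNat : Nat) : Int) = i := by omega
  have hne : {t : Nat | pvReachB ord n i (t : Int) = true}.Nonempty := by
    refine ⟨i.toNat, ?_⟩
    rw [Set.mem_setOf_eq, hcast, pvReachB_iff ord n i i hg ⟨hi0, hi1⟩]
    exact ⟨0, rfl⟩
  have hmem := Nat.sInf_mem hne
  rw [Set.mem_setOf_eq] at hmem
  exact (pvReachB_iff ord n i _ hg ⟨hi0, hi1⟩).mp hmem

lemma pvOm_min (ord : List Int) (n : Nat) (i j : Int) (hg : pvGood ord n) (hi : pvIn n i)
    (h : pvReach ord i j) : pvOm ord n i ≤ j.toNat := by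
  apply Nat.sInf_le
  rw [Set.mem_setOf_eq]
  have hj := pvReach_in ord n i j hg hi h
  have hcast : ((j.toNat : Nat) : Int) = j := by obtain ⟨h0, _⟩ := hj; omega
  rw [hcast, pvReachB_iff ord n i j hg hi]
  exact h

lemma pvMin_iff (ord : List Int) (n : Nat) (i : Int) (hg : pvGood ord n) (hi : pvIn n i) :
    pvIsMin ord i ↔ ((pvOm ord n i : Nat) : Int) = i := by
  constructor
  · intro hmin
    have h1 := pvOm_min ord n i i hg hi ⟨0, rfl⟩
    obtain ⟨k, hk⟩ := pvOm_reach ord n i hg hi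
    have h2 := hmin k
    rw [hk] at h2
    obtain ⟨hi0, _⟩ := hi
    omega
  · intro hom k
    have h := pvOm_min ord n i ((pvG ord)^[k] i) hg hi ⟨k, rfl⟩
    obtain ⟨h0, _⟩ := pvIter_in ord n i hg hi k
    omega

lemma pvOm_invariant (ord : List Int) (n : Nat) (i j : Int) (hg : pvGood ord n) (hi : pvIn n i)
    (h : pvReach ord i j) : pvOm ord n i = pvOm ord n j := by
  have hj := pvReach_in ord n i j hg hi h
  have htrans : ∀ a b c : Int, pvReach ord a b → pvReach ord b c → pvReach ord a c := by
    rintro a b c ⟨k1, hk1⟩ ⟨k2, hk2⟩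
    exact ⟨k2 + k1, by rw [Function.iterate_add_apply, hk1, hk2]⟩
  have h1 : pvOm ord n i ≤ pvOm ord n j := by
    have := pvOm_min ord n i _ hg hi (htrans _ _ _ h (pvOm_reach ord n j hg hj))
    omega
  have h2 : pvOm ord n j ≤ pvOm ord n i := by
    have := pvOm_min ord n j _ hg hj
      (htrans _ _ _ (pvReach_symm ord n i j hg hi h) (pvOm_reach ord n i hg hi))
    omega
  omega

lemma pvFixed_isMin (ord : List Int) (i : Int) (h : pvG ord i = i) : pvIsMin ord i := by
  intro k
  rw [Function.iterate_fixed h]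

-- ---- the shared permutation 'ord' ----

lemma pvGood_sorted (permut : List Int) :
    pvGood (PySem.List.sorted (PySem.List.pyRange 0 (PySem.List.len permut) 1)
      (fun i => PySem.List.pyGetD permut i 0) false) permut.length := by
  refine ⟨?_, ?_, ?_⟩
  · rw [PySem.List.length_sorted, PySem.List.length_pyRange_one]
    simp [PySem.List.len]
  · intro j hj
    rw [PySem.List.mem_sorted] at hj
    rw [PySem.List.mem_pyRange_one] at hj
    simp only [PySem.List.len] at hj
    omega
  · exact ((PySem.List.sorted_perm _ _ _).nodup_iff).mpr (PySem.List.nodup_pyRange_one _ _)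

-- ---- B side ----

lemma pvM_ex (ord : List Int) (n : Nat) (i : Int) (hg : pvGood ord n) (hi : pvIn n i) :
    ∃ m, 0 < m ∧ (pvG ord)^[m] i ≤ i := by
  obtain ⟨hp, hpi⟩ := pvPer_mem ord n i hg hi
  exact ⟨pvPer ord i, hp, le_of_eq hpi⟩

lemma pvM_pos (ord : List Int) (n : Nat) (i : Int) (hg : pvGood ord n) (hi : pvIn n i) :
    0 < pvM ord i := by
  exact (Nat.sInf_mem (pvM_ex ord n i hg hi)).1

lemma pvM_le_per (ord : List Int) (n : Nat) (i : Int) (hg : pvGood ord n) (hi : pvIn n i) :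
    pvM ord i ≤ pvPer ord i := by
  obtain ⟨hp, hpi⟩ := pvPer_mem ord n i hg hi
  exact Nat.sInf_le ⟨hp, le_of_eq hpi⟩

lemma pvM_spec (ord : List Int) (n : Nat) (i : Int) (hg : pvGood ord n) (hi : pvIn n i) :
    (pvG ord)^[pvM ord i] i ≤ i := by
  exact (Nat.sInf_mem (pvM_ex ord n i hg hi)).2

lemma pvM_min (ord : List Int) (n : Nat) (i : Int) (hg : pvGood ord n) (hi : pvIn n i)
    (m : Nat) (hm0 : 0 < m) (hm : m < pvM ord i) : i < (pvG ord)^[m] i := by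
  by_contra hcon
  rw [not_lt] at hcon
  have hle : pvM ord i ≤ m := Nat.sInf_le ⟨hm0, hcon⟩
  omega

lemma pvWalk_run (ord : List Int) (n : Nat) (i : Int) (hg : pvGood ord n) (hi : pvIn n i) :
    ∀ (fuel s : Nat), 1 ≤ s → s ≤ pvM ord i → pvM ord i - s ≤ fuel →
      pcWalk ord fuel i ((pvG ord)^[s] i) = (pvG ord)^[pvM ord i] i := by
  intro fuel
  induction fuel with
  | zero =>
    intro s hs1 hs2 hf
    have : s = pvM ord i := by omega
    subst this
    rfl
  | succ fuel ih =>
    intro s hs1 hs2 hf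
    by_cases hsM : s = pvM ord i
    · subst hsM
      have hle := pvM_spec ord n i hg hi
      show (if (pvG ord)^[pvM ord i] i > i then _ else _) = _
      rw [if_neg (by omega)]
    · have hlt : s < pvM ord i := by omega
      have hgt : i < (pvG ord)^[s] i := pvM_min ord n i hg hi s (by omega) hlt
      show (if (pvG ord)^[s] i > i then
          pcWalk ord fuel i (PySem.List.pyGetD ord ((pvG ord)^[s] i) 0) else _) = _
      rw [if_pos hgt]
      have hstep : PySem.List.pyGetD ord ((pvG ord)^[s] i) 0 = (pvG ord)^[s + 1] i := by
        rw [Function.iterate_succ_apply']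
        rfl
      rw [hstep]
      exact ih (s + 1) (by omega) (by omega) (by omega)

lemma pvIterM_iff (ord : List Int) (n : Nat) (i : Int) (hg : pvGood ord n) (hi : pvIn n i) :
    (pvG ord)^[pvM ord i] i = i ↔ pvIsMin ord i := by
  constructor
  · intro h k
    rw [pvIterMod ord i (pvM ord i) h k]
    rcases Nat.eq_zero_or_pos (k % pvM ord i) with h0 | h0
    · rw [h0]; rfl
    · have hMpos := pvM_pos ord n i hg hi
      have hlt := Nat.mod_lt k hMpos
      exact le_of_lt (pvM_min ord n i hg hi _ h0 hlt)
  · intro hmin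
    have h1 := pvM_spec ord n i hg hi
    have h2 := hmin (pvM ord i)
    omega

lemma pvWalk_iff (ord : List Int) (n : Nat) (i : Int) (hg : pvGood ord n) (hi : pvIn n i) :
    pcWalk ord n i (pvG ord i) = i ↔ pvIsMin ord i := by
  have hMpos := pvM_pos ord n i hg hi
  have hMle : pvM ord i ≤ n :=
    le_trans (pvM_le_per ord n i hg hi) (pvPer_le ord n i hg hi)
  have h1 : pvG ord i = (pvG ord)^[1] i := by rw [Function.iterate_one]
  rw [h1, pvWalk_run ord n i hg hi n 1 le_rfl hMpos (by omega)]
  exact pvIterM_iff ord n i hg hi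

lemma pvB_eq (permut : List Int) :
    permut_cycles_alt permut =
      ((pvCnt (PySem.List.sorted (PySem.List.pyRange 0 (PySem.List.len permut) 1)
        (fun i => PySem.List.pyGetD permut i 0) false) permut.length permut.length : Nat) : Int) := by
  unfold permut_cycles_alt
  set n := permut.length with hn
  set ord := PySem.List.sorted (PySem.List.pyRange 0 (PySem.List.len permut) 1)
    (fun i => PySem.List.pyGetD permut i 0) false with hord
  have hg : pvGood ord n := pvGood_sorted permut
  rw [PySem.List.foldl_if_add_one
    (fun i => pcWalk ord permut.length i (PySem.List.pyGetD ord i 0) == i)]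
  rw [PySem.List.pyRange_one, List.countP_map]
  have hlen : (PySem.List.len permut - 0).toNat = n := by
    simp [PySem.List.len, hn]
  rw [hlen]
  unfold pvCnt
  rw [zero_add]
  congr 1
  apply List.countP_congr
  intro k hk
  rw [List.mem_range] at hk
  have hkin : pvIn n ((k : Nat) : Int) := ⟨by omega, by omega⟩
  simp only [Function.comp_apply, zero_add, beq_iff_eq]
  have hwalk : pcWalk ord n (k : Int) (pvG ord (k : Int)) = (k : Int) ↔ pvIsMin ord (k : Int) :=
    pvWalk_iff ord n (k : Int) hg hkin
  have hmin : pvIsMin ord (k : Int) ↔ ((pvOm ord n (k : Int) : Nat) : Int) = (k : Int) :=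
    pvMin_iff ord n (k : Int) hg hkin
  constructor
  · intro h
    have := (hmin.mp (hwalk.mp h))
    omega
  · intro h
    apply hwalk.mpr
    apply hmin.mpr
    omega

-- ---- A side ----

lemma pvInsertBy_map {a b : Type} (f : a → b) (bf : b → b → Bool) (bl : a → a → Bool)
    (hb : ∀ x y, bf (f x) (f y) = bl x y) (x : a) (ys : List a) :
    PySem.List.insertBy bf (f x) (ys.map f) = (PySem.List.insertBy bl x ys).map f := by
  induction ys with
  | nil => simp [PySem.List.insertBy]
  | cons y ys ih =>
    simp only [List.map_cons, PySem.List.insertBy, hb]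
    by_cases h : bl x y = true
    · simp [h]
    · simp only [Bool.not_eq_true] at h
      simp [h, ih]

lemma pvSorted_map {a b k : Type} [LT k] [DecidableLT k] (f : a → b) (l : List a) (key : b → k) :
    PySem.List.sorted (l.map f) key false = (PySem.List.sorted l (fun x => key (f x)) false).map f := by
  rw [PySem.List.sorted_eq_foldl_insertBy, PySem.List.sorted_eq_foldl_insertBy, List.foldl_map]
  suffices h : ∀ init : List a,
      l.foldl (fun acc x => PySem.List.insertBy (fun p q => decide (key p < key q)) (f x) acc)
        (init.map f) =
      (l.foldl (fun acc x =>
        PySem.List.insertBy (fun p q => decide (key (f p) < key (f q))) x acc) init).map f by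
    exact h []
  induction l with
  | nil => intro init; rfl
  | cons x xs ih =>
    intro init
    simp only [List.foldl_cons]
    rw [pvInsertBy_map f _ _ (fun p q => rfl) x init]
    exact ih _

lemma pvA_indexed (permut : List Int) :
    PySem.List.sorted (PySem.List.enumerate permut) (fun e => e.2) false =
      (PySem.List.sorted (PySem.List.pyRange 0 (PySem.List.len permut) 1)
        (fun i => PySem.List.pyGetD permut i 0) false).map
        (fun j => (j, PySem.List.pyGetD permut j 0)) := by
  rw [PySem.List.enumerate_eq_map_pyRange permut 0]
  exact pvSorted_map (fun j => (j, PySem.List.pyGetD permut j 0))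
    (PySem.List.pyRange 0 (PySem.List.len permut) 1) (fun e => e.2)

lemma pvIdx_fst (ord : List Int) (n : Nat) (key : Int → Int) (t : Int) (hg : pvGood ord n)
    (ht : pvIn n t) :
    (PySem.List.pyGetD (ord.map (fun j => (j, key j))) t ((0 : Int), (0 : Int))).1 = pvG ord t := by
  have hlen := hg.1
  obtain ⟨ht0, ht1⟩ := ht
  have hl : t.toNat < ord.length := by omega
  rw [PySem.List.pyGetD_eq_getElem _ _ ht0 (by simp; omega)]
  rw [List.getElem_map]
  rw [pvG_getElem ord n t hg ⟨ht0, ht1⟩ hl]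

lemma pvVisited0 (l : List Int) (d : PySem.Dict Int Bool)
    (hd : ∀ j, d.getD j false = false) (j : Int) :
    (l.foldl (fun d b => d.insert b false) d).getD j false = false := by
  induction l generalizing d with
  | nil => exact hd j
  | cons b l ih =>
    simp only [List.foldl_cons]
    apply ih
    intro j'
    rw [PySem.Dict.getD_insert]
    split <;> simp [hd]

lemma pvMark (ord : List Int) (n : Nat) (i : Int) (idx : List (Int × Int)) (hg : pvGood ord n)
    (hi : pvIn n i)
    (hidx : ∀ t, pvIn n t → (PySem.List.pyGetD idx t ((0 : Int), (0 : Int))).1 = pvG ord t)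
    (v : PySem.Dict Int Bool)
    (horb : ∀ k : Nat, v.getD ((pvG ord)^[k] i) false = false) :
    ∀ (fuel s : Nat) (v' : PySem.Dict Int Bool), s ≤ pvPer ord i →
      pvPer ord i - s + 1 ≤ fuel →
      (∀ j, v'.getD j false = true ↔ (v.getD j false = true ∨ ∃ k < s, (pvG ord)^[k] i = j)) →
      ∀ j, (pcWhile idx fuel v' ((pvG ord)^[s] i)).1.getD j false = true ↔
        (v.getD j false = true ∨ pvReach ord i j) := by
  intro fuel
  induction fuel with
  | zero => intro s v' hs hfuel hv' j; omega
  | succ fuel ih =>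
    intro s v' hs hfuel hv' j
    have hper := pvPer_mem ord n i hg hi
    by_cases hsp : s = pvPer ord i
    · -- the walk is back at i, which is already marked: the loop stops
      have hmark : v'.getD ((pvG ord)^[s] i) false = true := by
        rw [hv']
        right
        exact ⟨0, by omega, by rw [hsp, hper.2]; rfl⟩
      show ((if v'.getD ((pvG ord)^[s] i) false = true then (v', _) else _ :
        PySem.Dict Int Bool × Int)).1.getD j false = true ↔ _
      rw [if_pos hmark]
      rw [hv' j]
      constructor
      · rintro (h | ⟨k, _, hk⟩)
        · exact Or.inl h
        · exact Or.inr ⟨k, hk⟩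
      · rintro (h | ⟨k, hk⟩)
        · exact Or.inl h
        · right
          refine ⟨k % pvPer ord i, by have := Nat.mod_lt k hper.1; omega, ?_⟩
          rw [← pvIterMod ord i _ hper.2 k]
          exact hk
    · have hslt : s < pvPer ord i := by omega
      -- the current element is unmarked: mark it and continue
      have hum : v'.getD ((pvG ord)^[s] i) false = false := by
        cases hcur : v'.getD ((pvG ord)^[s] i) false with
        | false => rfl
        | true =>
          exfalso
          rw [hv'] at hcur
          rcases hcur with h | ⟨k, hks, hk⟩
          · rw [horb s] at h; exact absurd h (by simp)
          · have hsplit : (pvG ord)^[s] i = (pvG ord)^[k] ((pvG ord)^[s - k] i) := by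
              rw [← Function.iterate_add_apply]
              congr 1
              omega
            rw [hsplit] at hk
            have := pvCancel ord n k ((pvG ord)^[s - k] i) i hg
              (pvIter_in ord n i hg hi _) hi (by rw [hk])
            exact pvPer_min ord n i hg hi (s - k) (by omega) (by omega) this
      show ((if v'.getD ((pvG ord)^[s] i) false = true then _
        else pcWhile idx fuel (v'.insert ((pvG ord)^[s] i) true)
          (PySem.List.pyGetD idx ((pvG ord)^[s] i) ((0 : Int), (0 : Int))).1 :
        PySem.Dict Int Bool × Int)).1.getD j false = true ↔ _
      rw [if_neg (by simp [hum])]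
      have hstep : (PySem.List.pyGetD idx ((pvG ord)^[s] i) ((0 : Int), (0 : Int))).1 =
          (pvG ord)^[s + 1] i := by
        rw [hidx _ (pvIter_in ord n i hg hi s), Function.iterate_succ_apply']
      rw [hstep]
      apply ih (s + 1) _ (by omega) (by omega)
      intro j'
      rw [PySem.Dict.getD_insert]
      split
      · rename_i hj'
        subst hj'
        simp only [true_iff]
        right
        exact ⟨s, by omega, rfl⟩
      · rename_i hj'
        rw [hv' j']
        constructor
        · rintro (h | ⟨k, hks, hk⟩)
          · exact Or.inl h
          · exact Or.inr ⟨k, by omega, hk⟩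
        · rintro (h | ⟨k, hks, hk⟩)
          · exact Or.inl h
          · refine Or.inr ⟨k, by
              rcases Nat.lt_or_ge k s with h' | h'
              · omega
              · exfalso
                have : k = s := by omega
                subst this
                exact hj' hk.symm, hk⟩

lemma pvA_loop (permut : List Int) (ord : List Int) (n : Nat) (hg : pvGood ord n)
    (hn : n = permut.length)
    (hord : ord = PySem.List.sorted (PySem.List.pyRange 0 (PySem.List.len permut) 1)
      (fun i => PySem.List.pyGetD permut i 0) false) :
    ∀ i : Nat, i ≤ n →
      ∃ v : PySem.Dict Int Bool,
        (PySem.List.pyRange 0 (i : Int) 1).foldl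
          (fun (st : PySem.Dict Int Bool × Int) t =>
            if in_its_place
                (PySem.List.pyGetD (ord.map (fun j => (j, PySem.List.pyGetD permut j 0))) t
                  ((0 : Int), (0 : Int))).1 t then (st.1, st.2 + 1)
            else if st.1.getD t false then st
            else ((pcWhile (ord.map (fun j => (j, PySem.List.pyGetD permut j 0)))
                (permut.length + 1) st.1 t).1, st.2 + 1))
          ((PySem.List.pyRange 0 (PySem.List.len permut) 1).foldl
            (fun d b => d.insert b false) PySem.Dict.empty, 0) =
          (v, ((pvCnt ord n i : Nat) : Int)) ∧
        (∀ j : Int, (v.getD j false = true ↔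
          ∃ s : Nat, s < i ∧ pvIsMin ord (s : Int) ∧ pvG ord (s : Int) ≠ (s : Int) ∧
            pvReach ord (s : Int) j)) := by
  intro i
  induction i with
  | zero =>
    intro _
    refine ⟨(PySem.List.pyRange 0 (PySem.List.len permut) 1).foldl
      (fun d b => d.insert b false) PySem.Dict.empty, ?_, ?_⟩
    · rw [show ((0 : Nat) : Int) = 0 by simp, PySem.List.pyRange_one_eq_nil le_rfl]
      rfl
    · intro j
      rw [pvVisited0 _ _ (fun j => PySem.Dict.getD_empty j false) j]
      constructor
      · intro h; exact absurd h (by simp)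
      · rintro ⟨sv, hsv, _⟩; omega
  | succ i ih =>
    intro hi1
    obtain ⟨v, hfold, hv⟩ := ih (by omega)
    have hkin : pvIn n ((i : Nat) : Int) := ⟨by omega, by omega⟩
    have hfst := pvIdx_fst ord n (fun j => PySem.List.pyGetD permut j 0) (i : Int) hg hkin
    have hsplit : PySem.List.pyRange 0 ((i + 1 : Nat) : Int) 1 =
        PySem.List.pyRange 0 (i : Int) 1 ++ [(i : Int)] := by
      rw [show ((i + 1 : Nat) : Int) = (i : Int) + 1 by push_cast; ring]
      exact PySem.List.pyRange_one_succ_right (by positivity)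
    rw [hsplit, List.foldl_append, hfold]
    simp only [List.foldl_cons, List.foldl_nil, in_its_place, hfst]
    have hcnt : ∀ b : Bool, ((pvOm ord n ((i : Nat) : Int) == i) = b) →
        pvCnt ord n (i + 1) = pvCnt ord n i + (if b then 1 else 0) := by
      intro b hb
      unfold pvCnt
      rw [List.range_succ, List.countP_append]
      simp only [List.countP_cons, List.countP_nil, hb]
      cases b <;> simp
    by_cases hfix : pvG ord ((i : Nat) : Int) = ((i : Nat) : Int)
    · -- fixed point: counted, not marked
      rw [if_pos (by exact beq_iff_eq.mpr hfix)]
      have hmin : pvIsMin ord ((i : Nat) : Int) := pvFixed_isMin ord _ hfix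
      have hom : pvOm ord n ((i : Nat) : Int) = i := by
        have := (pvMin_iff ord n _ hg hkin).mp hmin
        omega
      rw [hcnt true (by simp [hom])]
      refine ⟨v, by simp, ?_⟩
      intro j
      rw [hv j]
      constructor
      · rintro ⟨sv, hsv, h2, h3, h4⟩; exact ⟨sv, by omega, h2, h3, h4⟩
      · rintro ⟨sv, hsv, h2, h3, h4⟩
        refine ⟨sv, ?_, h2, h3, h4⟩
        rcases Nat.lt_or_ge sv i with h' | h'
        · omega
        · exfalso
          have : sv = i := by omega
          subst this
          exact h3 hfix
    · rw [if_neg (by simp [hfix])]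
      have hnfix : pvG ord ((i : Nat) : Int) ≠ ((i : Nat) : Int) := hfix
      by_cases hvis : v.getD ((i : Nat) : Int) false = true
      · -- already visited: cycle counted earlier at its minimum
        rw [if_pos hvis]
        obtain ⟨sv, hsv, hsmin, hsnf, hsreach⟩ := (hv _).mp hvis
        have hsin : pvIn n ((sv : Nat) : Int) := ⟨by omega, by omega⟩
        have hnmin : ¬ pvIsMin ord ((i : Nat) : Int) := by
          intro hmin
          obtain ⟨k, hk⟩ := pvReach_symm ord n _ _ hg hsin hsreach
          have := hmin k
          rw [hk] at this
          omega
        have hom : ¬ (pvOm ord n ((i : Nat) : Int) = i) := by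
          intro h
          exact hnmin ((pvMin_iff ord n _ hg hkin).mpr (by omega))
        rw [hcnt false (by simp [hom])]
        refine ⟨v, by simp, ?_⟩
        intro j
        rw [hv j]
        constructor
        · rintro ⟨sw, hsw, h2, h3, h4⟩; exact ⟨sw, by omega, h2, h3, h4⟩
        · rintro ⟨sw, hsw, h2, h3, h4⟩
          refine ⟨sw, ?_, h2, h3, h4⟩
          rcases Nat.lt_or_ge sw i with h' | h'
          · omega
          · exfalso
            have : sw = i := by omega
            subst this
            exact hnmin h2
      · -- new cycle: count it and mark it
        rw [if_neg hvis]
        have horb : ∀ k : Nat, v.getD ((pvG ord)^[k] ((i : Nat) : Int)) false = false := by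
          intro k
          cases hcur : v.getD ((pvG ord)^[k] ((i : Nat) : Int)) false with
          | false => rfl
          | true =>
            exfalso
            obtain ⟨sw, hsw, h2, h3, h4⟩ := (hv _).mp hcur
            have hki : pvReach ord ((pvG ord)^[k] ((i : Nat) : Int)) ((i : Nat) : Int) :=
              pvReach_symm ord n _ _ hg hkin ⟨k, rfl⟩
            have : pvReach ord ((sw : Nat) : Int) ((i : Nat) : Int) := by
              obtain ⟨k1, hk1⟩ := h4
              obtain ⟨k2, hk2⟩ := hki
              exact ⟨k2 + k1, by rw [Function.iterate_add_apply, hk1, hk2]⟩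
            exact hvis ((hv _).mpr ⟨sw, hsw, h2, h3, this⟩)
        have hmin : pvIsMin ord ((i : Nat) : Int) := by
          by_contra hnm
          simp only [pvIsMin, not_forall, not_le] at hnm
          obtain ⟨k, hk⟩ := hnm
          set s0 := pvOm ord n ((i : Nat) : Int) with hs0
          have hreach0 : pvReach ord ((i : Nat) : Int) ((s0 : Nat) : Int) :=
            pvOm_reach ord n _ hg hkin
          have hs0in : pvIn n ((s0 : Nat) : Int) := pvReach_in ord n _ _ hg hkin hreach0
          have hle := pvOm_min ord n _ _ hg hkin (⟨k, rfl⟩ :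
            pvReach ord ((i : Nat) : Int) ((pvG ord)^[k] ((i : Nat) : Int)))
          obtain ⟨hit0, _⟩ := pvIter_in ord n _ hg hkin k
          have hs0lt : s0 < i := by omega
          have hs0min : pvIsMin ord ((s0 : Nat) : Int) := by
            apply (pvMin_iff ord n _ hg hs0in).mpr
            have := pvOm_invariant ord n _ _ hg hkin hreach0
            omega
          have hs0nf : pvG ord ((s0 : Nat) : Int) ≠ ((s0 : Nat) : Int) := by
            intro hf
            obtain ⟨k2, hk2⟩ := pvReach_symm ord n _ _ hg hkin hreach0
            rw [Function.iterate_fixed hf] at hk2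
            omega
          exact hvis ((hv _).mpr ⟨s0, hs0lt, hs0min, hs0nf,
            pvReach_symm ord n _ _ hg hkin hreach0⟩)
        have hom : pvOm ord n ((i : Nat) : Int) = i := by
          have := (pvMin_iff ord n _ hg hkin).mp hmin
          omega
        rw [hcnt true (by simp [hom])]
        have hmark := pvMark ord n ((i : Nat) : Int)
          (ord.map (fun j => (j, PySem.List.pyGetD permut j 0))) hg hkin
          (fun t ht => pvIdx_fst ord n (fun j => PySem.List.pyGetD permut j 0) t hg ht)
          v horb (permut.length + 1) 0 v (by omega)
          (by have := pvPer_le ord n _ hg hkin; omega)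
          (by intro j; simp)
        simp only [Function.iterate_zero_apply] at hmark
        refine ⟨(pcWhile (ord.map (fun j => (j, PySem.List.pyGetD permut j 0)))
          (permut.length + 1) v ((i : Nat) : Int)).1, by simp, ?_⟩
        intro j
        rw [hmark j]
        constructor
        · rintro (h | h)
          · obtain ⟨sw, hsw, h2, h3, h4⟩ := (hv _).mp h
            exact ⟨sw, by omega, h2, h3, h4⟩
          · exact ⟨i, by omega, hmin, hnfix, h⟩
        · rintro ⟨sw, hsw, h2, h3, h4⟩
          rcases Nat.lt_or_ge sw i with h' | h'
          · exact Or.inl ((hv _).mpr ⟨sw, h', h2, h3, h4⟩)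
          · right
            have : sw = i := by omega
            subst this
            exact h4

lemma pvA_eq (permut : List Int) :
    permut_cycles permut =
      ((pvCnt (PySem.List.sorted (PySem.List.pyRange 0 (PySem.List.len permut) 1)
        (fun i => PySem.List.pyGetD permut i 0) false) permut.length permut.length : Nat) : Int) := by
  obtain ⟨v, hfold, -⟩ := pvA_loop permut
    (PySem.List.sorted (PySem.List.pyRange 0 (PySem.List.len permut) 1)
      (fun i => PySem.List.pyGetD permut i 0) false) permut.length
    (pvGood_sorted permut) rfl rfl permut.length le_rfl
  unfold permut_cycles
  rw [pvA_indexed permut]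
  simp only [PySem.List.len] at hfold ⊢
  rw [hfold]

-- ===== VERDICT (by name: the statement is the Claim_ definition above) =====
theorem permut_cycles_spec : Claim_equal_permut_cycles := by
  intro permut _
  unfold Spec_permut_cycles
  rw [pvA_eq, pvB_eq]
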